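-- pv_equiv track=rewrite | github.com/DakshRocks21/SadGuard | webhook/utils/analysis.py | suggest_actions_from_findings
-- ===== SOURCE A (Python) =====
-- from typing import List, Optional, Tuple
--
-- def suggest_actions_from_findings(findings: List[str]) -> List[str]:
--     """Return short actionable suggestions derived from findings.
--
--     This maps common problem tokens to practical next steps a reviewer can follow.
--     """
--     suggestions = []
--     for f in findings:
--         lf = f.lower()
--         if "permission denied" in lf or "permissionerror" in lf:
--             suggestions.append("Check file and directory permissions and the user the container runs as.")
--         elif "timeout" in lf:
--             suggestions.append("Increase relevant timeouts or investigate network connectivity to external services.")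
--         elif "connection refused" in lf or "failed to connect" in lf:
--             suggestions.append("Verify service endpoints and network access from inside the container.")
--         elif "traceback" in lf or "exception" in lf:
--             suggestions.append("Inspect the stack trace and attach the smallest failing repro if possible.")
--         elif "segfault" in lf or "panic" in lf:
--             suggestions.append("Consider running under a debugger or adding logging; check native deps and memory usage.")
--         elif "warning" in lf:
--             suggestions.append("Review the warning and determine if it can safely be ignored or needs fixing.")
--         elif "error" in lf or "failed" in lf:
--             suggestions.append("Re-run the failing step locally with verbose logging and capture full output for triage.")
--
--     # Deduplicate while preserving order and keep at most 5 suggestions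
--     seen = set()
--     deduped = []
--     for s in suggestions:
--         if s not in seen:
--             seen.add(s)
--             deduped.append(s)
--         if len(deduped) >= 5:
--             break
--
--     # If no suggestions could be inferred, give a generic next step
--     if not deduped:
--         deduped.append("If unclear, re-run the failing command with increased logging and attach the output.")
--
--     return deduped
-- ===== SOURCE B (Python) =====
-- RULES = [
--     (("permission denied", "permissionerror"),
--      "Check file and directory permissions and the user the container runs as."),
--     (("timeout",),
--      "Increase relevant timeouts or investigate network connectivity to external services."),
--     (("connection refused", "failed to connect"),
--      "Verify service endpoints and network access from inside the container."),
--     (("traceback", "exception"),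
--      "Inspect the stack trace and attach the smallest failing repro if possible."),
--     (("segfault", "panic"),
--      "Consider running under a debugger or adding logging; check native deps and memory usage."),
--     (("warning",),
--      "Review the warning and determine if it can safely be ignored or needs fixing."),
--     (("error", "failed"),
--      "Re-run the failing step locally with verbose logging and capture full output for triage."),
-- ]
--
-- GENERIC = "If unclear, re-run the failing command with increased logging and attach the output."
--
--
-- def suggest_actions_from_findings(findings):
--     out = []
--     for f in findings:
--         lf = f.lower()
--         for keys, sug in RULES:
--             if any(k in lf for k in keys):
--                 if sug not in out:
--                     out.append(sug)
--                 break
--         if len(out) >= 5: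
--             break
--     return out or [GENERIC]
-- ===== Notes on version B (the rewrite author's own statement) =====
-- stated objective: idiomatic
-- what changed: Replaces the fixed if/elif dispatch plus a separate dedup pass with an ordered (keywords, suggestion) rule table scanned per finding, dedup and the cap of 5 fused into the single loop (with early exit), no auxiliary seen-set.
import Mathlib
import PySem

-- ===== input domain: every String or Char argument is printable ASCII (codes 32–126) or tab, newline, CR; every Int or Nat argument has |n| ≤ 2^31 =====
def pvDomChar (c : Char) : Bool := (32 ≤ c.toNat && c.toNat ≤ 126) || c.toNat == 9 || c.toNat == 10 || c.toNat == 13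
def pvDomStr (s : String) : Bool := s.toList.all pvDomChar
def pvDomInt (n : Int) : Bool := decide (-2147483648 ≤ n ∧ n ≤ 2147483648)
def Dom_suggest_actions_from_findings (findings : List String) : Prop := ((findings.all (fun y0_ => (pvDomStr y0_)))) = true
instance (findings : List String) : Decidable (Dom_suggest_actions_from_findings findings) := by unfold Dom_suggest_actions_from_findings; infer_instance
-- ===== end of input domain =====

-- B replaces A's fixed if/elif dispatch + separate dedup pass by an ordered rule table
-- scanned per finding, with dedup and the cap of 5 fused into one loop (objective: idiomatic).


-- ===== PORT A =====
-- one step of A's if/elif chain: the suggestion appended for finding f (none if no branch fires)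
def sugA (f : String) : List String :=
  let lf := PySem.Str.lower f
  if PySem.Str.isIn "permission denied" lf || PySem.Str.isIn "permissionerror" lf then
    ["Check file and directory permissions and the user the container runs as."]
  else if PySem.Str.isIn "timeout" lf then
    ["Increase relevant timeouts or investigate network connectivity to external services."]
  else if PySem.Str.isIn "connection refused" lf || PySem.Str.isIn "failed to connect" lf then
    ["Verify service endpoints and network access from inside the container."]
  else if PySem.Str.isIn "traceback" lf || PySem.Str.isIn "exception" lf then
    ["Inspect the stack trace and attach the smallest failing repro if possible."]
  else if PySem.Str.isIn "segfault" lf || PySem.Str.isIn "panic" lf then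
    ["Consider running under a debugger or adding logging; check native deps and memory usage."]
  else if PySem.Str.isIn "warning" lf then
    ["Review the warning and determine if it can safely be ignored or needs fixing."]
  else if PySem.Str.isIn "error" lf || PySem.Str.isIn "failed" lf then
    ["Re-run the failing step locally with verbose logging and capture full output for triage."]
  else []

-- A's second loop: dedup preserving order, break once 5 are kept
def dedupA : List String → PySem.Set String → List String → List String
  | [], _, deduped => deduped
  | s :: rest, seen, deduped =>
    let st := if seen.contains s then (seen, deduped)
              else (PySem.Set.add seen s, deduped ++ [s])
    if st.2.length ≥ 5 then st.2 else dedupA rest st.1 st.2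

def suggest_actions_from_findings (findings : List String) : List String :=
  let suggestions := findings.foldl (fun acc f => acc ++ sugA f) []
  let deduped := dedupA suggestions PySem.Set.empty []
  if deduped.isEmpty then
    deduped ++ ["If unclear, re-run the failing command with increased logging and attach the output."]
  else deduped

-- ===== PORT B =====
def pvRules : List (List String × String) :=
  [(["permission denied", "permissionerror"],
    "Check file and directory permissions and the user the container runs as."),
   (["timeout"],
    "Increase relevant timeouts or investigate network connectivity to external services."),
   (["connection refused", "failed to connect"],
    "Verify service endpoints and network access from inside the container."),
   (["traceback", "exception"],
    "Inspect the stack trace and attach the smallest failing repro if possible."),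
   (["segfault", "panic"],
    "Consider running under a debugger or adding logging; check native deps and memory usage."),
   (["warning"],
    "Review the warning and determine if it can safely be ignored or needs fixing."),
   (["error", "failed"],
    "Re-run the failing step locally with verbose logging and capture full output for triage.")]

-- the inner rule scan with break: suggestion of the first rule with a matching keyword
def pvFindRule : List (List String × String) → String → Option String
  | [], _ => none
  | (keys, sug) :: rest, lf =>
    if keys.any (fun k => PySem.Str.isIn k lf) then some sug else pvFindRule rest lf

-- B's single fused loop: classify, dedup against the output itself, cap at 5 with break
def pvAltLoop : List String → List String → List String
  | [], out => out
  | f :: rest, out =>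
    let out' := match pvFindRule pvRules (PySem.Str.lower f) with
      | some sug => if out.contains sug then out else out ++ [sug]
      | none => out
    if out'.length ≥ 5 then out' else pvAltLoop rest out'

def suggest_actions_from_findings_alt (findings : List String) : List String :=
  let out := pvAltLoop findings []
  if out.isEmpty then
    ["If unclear, re-run the failing command with increased logging and attach the output."]
  else out

-- ===== PRECONDITION & SPEC =====
def Spec_suggest_actions_from_findings (findings : List String) (out : List String) : Prop := out = suggest_actions_from_findings_alt findings
instance (findings : List String) (out : List String) : Decidable (Spec_suggest_actions_from_findings findings out) := by unfold Spec_suggest_actions_from_findings; infer_instance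

-- ===== CLAIM (what is proved, stated in full; the proofs are below) =====
def Claim_equal_suggest_actions_from_findings : Prop := ∀ (findings : List String), Dom_suggest_actions_from_findings findings → Spec_suggest_actions_from_findings findings (suggest_actions_from_findings findings)

-- ===== LEMMAS AND PROOFS =====

-- per-finding agreement of the if/elif chain and the rule-table scan
theorem sugA_eq_findRule (f : String) :
    sugA f = ((pvFindRule pvRules (PySem.Str.lower f)).map (fun s => [s])).getD [] := by
  unfold sugA
  simp only [pvFindRule, pvRules, List.any_cons, List.any_nil, Bool.or_false]
  split_ifs <;> rfl

theorem foldl_sugA (fs : List String) (acc : List String) :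
    fs.foldl (fun acc f => acc ++ sugA f) acc = acc ++ fs.flatMap sugA := by
  exact PySem.List.foldl_append_eq_flatMap _ _ _

-- A's dedup loop over the collected suggestions equals B's fused loop over the findings,
-- provided the kept list is still below the cap (seen and deduped coincide as lists)
theorem dedup_eq_alt (fs : List String) (ded : List String) (h : ded.length < 5) :
    dedupA (fs.flatMap sugA) ded ded = pvAltLoop fs ded := by
  induction fs generalizing ded with
  | nil => simp [dedupA, pvAltLoop]
  | cons f rest ih =>
    rw [List.flatMap_cons, sugA_eq_findRule]
    cases hc : pvFindRule pvRules (PySem.Str.lower f) with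
    | none =>
      simp only [Option.map_none, Option.getD_none, List.nil_append]
      rw [pvAltLoop]
      simp only [hc]
      rw [if_neg (by omega)]
      exact ih ded h
    | some sug =>
      simp only [Option.map_some, Option.getD_some, List.cons_append, List.nil_append]
      rw [dedupA, pvAltLoop]
      simp only [hc]
      by_cases hmem : PySem.Set.contains ded sug = true
      · simp only [PySem.Set.contains] at hmem
        simp only [PySem.Set.contains, PySem.Set.add, hmem, if_true]
        rw [if_neg (by omega), if_neg (by omega)]
        exact ih ded h
      · simp only [PySem.Set.contains] at hmem
        simp only [PySem.Set.contains, PySem.Set.add, hmem, Bool.false_eq_true, if_false]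
        by_cases hlen : (ded ++ [sug]).length ≥ 5
        · rw [if_pos hlen, if_pos hlen]
        · rw [if_neg hlen, if_neg hlen]
          exact ih (ded ++ [sug]) (by simp at hlen ⊢; omega)

-- ===== VERDICT (by name: the statement is the Claim_ definition above) =====
theorem suggest_actions_from_findings_spec : Claim_equal_suggest_actions_from_findings := by
  intro findings _
  unfold Spec_suggest_actions_from_findings
  simp only [suggest_actions_from_findings, suggest_actions_from_findings_alt,
    foldl_sugA, List.nil_append, PySem.Set.empty]
  rw [dedup_eq_alt findings [] (by simp)]
  cases h : (pvAltLoop findings []).isEmpty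
  · simp
  · simp [List.isEmpty_iff.mp h]
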